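-- pv_equiv track=rewrite | github.com/georgeSEC1/BTC-market-intelligence | SynthReason alpha.py | convertB
-- ===== SOURCE A (Python) =====
-- targetNgramSize = 3
--
-- def convertB(lst):
--     process = lst.split(" ")
--     db = []
--     total = ""
--     for index in process:
--         total += index + " "
--         if len(index) < targetNgramSize:
--             db.append(total)
--             total = ""
--     return db
-- ===== SOURCE B (Python) =====
-- targetNgramSize = 3
--
-- def convertB(lst):
--     process = lst.split(" ")
--     bounds = [i for i, w in enumerate(process) if len(w) < targetNgramSize]
--     db = []
--     start = 0
--     for b in bounds:
--         db.append(" ".join(process[start:b + 1]) + " ")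
--         start = b + 1
--     return db
-- ===== Notes on version B (the rewrite author's own statement) =====
-- stated objective: alternative
-- what changed: A builds segments in one pass with a growing string accumulator flushed at each short word; B first collects the boundary indices (positions of words shorter than targetNgramSize) and then emits each segment by slicing the word list between consecutive boundaries and joining it, which also drops the post-last-boundary tail exactly as A drops its trailing buffer.
import Mathlib
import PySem

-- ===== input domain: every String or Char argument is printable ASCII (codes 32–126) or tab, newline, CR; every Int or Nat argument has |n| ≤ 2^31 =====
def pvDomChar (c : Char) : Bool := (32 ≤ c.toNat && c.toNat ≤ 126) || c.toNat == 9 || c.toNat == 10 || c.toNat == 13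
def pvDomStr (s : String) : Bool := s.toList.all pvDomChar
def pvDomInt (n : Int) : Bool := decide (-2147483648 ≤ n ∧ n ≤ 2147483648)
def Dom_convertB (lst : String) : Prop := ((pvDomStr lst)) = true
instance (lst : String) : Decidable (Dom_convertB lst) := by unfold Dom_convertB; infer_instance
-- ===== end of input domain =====

-- B replaces A's single accumulating pass by a boundary-index collection pass plus a
-- slice-and-join pass over those boundaries (alternative decomposition, same O(n) cost).

-- ===== PORT A =====
-- the loop body of A (total accumulation, flush at short words)
def pvStepA (st : List String × String) (index : String) : List String × String :=
  let total := st.2 ++ index ++ " "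
  if PySem.Str.len index < 3 then (st.1 ++ [total], "") else (st.1, total)

def convertB (lst : String) : List String :=
  let process := (PySem.Str.split? lst " ").getD []   -- sep " " ≠ "", split? always returns some
  (process.foldl pvStepA ([], "")).1

-- ===== PORT B =====
-- the loop body of B: append the joined slice process[start:b+1], start := b+1
def pvStepB (process : List String) (st : List String × Int) (b : Int) : List String × Int :=
  (st.1 ++ [PySem.Str.join " " (PySem.List.slice process (some st.2) (some (b + 1))) ++ " "],
   b + 1)

def convertB_alt (lst : String) : List String :=
  let process := (PySem.Str.split? lst " ").getD []   -- sep " " ≠ "", split? always returns some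
  let bounds := (PySem.List.enumerate process).filterMap
    (fun p => if PySem.Str.len p.2 < 3 then some p.1 else none)
  (bounds.foldl (pvStepB process) ([], 0)).1

-- ===== PRECONDITION & SPEC =====
def Spec_convertB (lst : String) (out : List String) : Prop := out = convertB_alt lst
instance (lst : String) (out : List String) : Decidable (Spec_convertB lst out) := by unfold Spec_convertB; infer_instance

-- ===== CLAIM (what is proved, stated in full; the proofs are below) =====
def Claim_equal_convertB : Prop := ∀ (lst : String), Dom_convertB lst → Spec_convertB lst (convertB lst)

-- ===== LEMMAS AND PROOFS =====

-- the segments of the word list: a short word closes a group; trailing words are dropped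
def pvGroups : List String → List (List String)
  | [] => []
  | w :: ws =>
    if PySem.Str.len w < 3 then [w] :: pvGroups ws
    else match pvGroups ws with
      | [] => []
      | g :: gs => (w :: g) :: gs

-- A's rendering of a group: each word followed by a space
def pvRender : List String → String
  | [] => ""
  | w :: g => w ++ " " ++ pvRender g

-- B's rendering of a group
def pvJoinRender (g : List String) : String := PySem.Str.join " " g ++ " "

-- the boundary indices (positions of short words), relative form
def pvBoundsN : List String → List Nat
  | [] => []
  | w :: ws => (if PySem.Str.len w < 3 then [0] else []) ++ (pvBoundsN ws).map (· + 1)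

lemma pvRender_append_singleton (pre : List String) (w : String) :
    pvRender (pre ++ [w]) = pvRender pre ++ w ++ " " := by
  induction pre with
  | nil => apply String.toList_inj.mp; simp [pvRender]
  | cons x xs ih =>
    apply String.toList_inj.mp
    have := congrArg String.toList ih
    simp [pvRender] at this ⊢
    simp [this]

lemma pvGroups_ne_nil (ws : List String) : ∀ g ∈ pvGroups ws, g ≠ [] := by
  induction ws with
  | nil => simp [pvGroups]
  | cons w ws ih =>
    intro g hg
    rw [pvGroups] at hg
    by_cases h : w.length < 3
    · simp [h] at hg
      rcases hg with h1 | h2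
      · simp [h1]
      · exact ih g h2
    · simp [h] at hg
      cases hgr : pvGroups ws with
      | nil => rw [hgr] at hg; simp at hg
      | cons g0 gs =>
        rw [hgr] at hg
        rcases List.mem_cons.mp hg with h1 | h2
        · simp [h1]
        · exact ih g (by rw [hgr]; exact List.mem_cons_of_mem _ h2)

lemma pvRender_toList (g : List String) (hne : g ≠ []) :
    (pvRender g).toList = PySem.Chars.join [' '] (g.map String.toList) ++ [' '] := by
  induction g with
  | nil => simp at hne
  | cons w g ih =>
    cases g with
    | nil => simp [pvRender, PySem.Chars.join_singleton]
    | cons v g' =>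
      rw [pvRender]
      simp [PySem.Chars.join_cons_cons, ih (by simp)]

lemma pvJoinRender_eq_pvRender (g : List String) (h : g ≠ []) :
    pvJoinRender g = pvRender g := by
  apply String.toList_inj.mp
  simp [pvJoinRender, PySem.Str.toList_join, pvRender_toList g h]

-- A's fold with pending prefix `pre` produces the groups, the first one merged with `pre`
lemma pvA_go (ws : List String) : ∀ (db : List String) (pre : List String),
    (ws.foldl pvStepA (db, pvRender pre)).1 =
      db ++ (match pvGroups ws with
        | [] => []
        | g :: gs => pvRender (pre ++ g) :: gs.map pvRender) := by
  induction ws with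
  | nil => intro db pre; simp [pvGroups]
  | cons w ws ih =>
    intro db pre
    by_cases h : w.length < 3
    · have hstep : pvStepA (db, pvRender pre) w
          = (db ++ [pvRender (pre ++ [w])], pvRender []) := by
        simp [pvStepA, h, pvRender_append_singleton, pvRender]
      rw [List.foldl_cons, hstep, ih]
      cases hgr : pvGroups ws with
      | nil => simp [pvGroups, h, hgr]
      | cons g gs => simp [pvGroups, h, hgr]
    · have hstep : pvStepA (db, pvRender pre) w = (db, pvRender (pre ++ [w])) := by
        simp [pvStepA, h, pvRender_append_singleton]
      rw [List.foldl_cons, hstep, ih]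
      cases hgr : pvGroups ws with
      | nil => simp [pvGroups, h, hgr]
      | cons g gs => simp [pvGroups, h, hgr]

lemma pvA_eq (ws : List String) :
    (ws.foldl pvStepA ([], "")).1 = (pvGroups ws).map pvRender := by
  have h0 : ("" : String) = pvRender [] := by simp [pvRender]
  rw [h0, pvA_go ws [] []]
  cases hgr : pvGroups ws with
  | nil => simp
  | cons g gs => simp

-- enumerate + filter gives the shifted boundary indices
lemma pvBounds_char (ws : List String) : ∀ (s : Int),
    (PySem.List.enumerate ws s).filterMap
        (fun p => if PySem.Str.len p.2 < 3 then some p.1 else none)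
      = (pvBoundsN ws).map (fun k : Nat => s + (k : Int)) := by
  induction ws with
  | nil => intro s; simp [PySem.List.enumerate_nil, pvBoundsN]
  | cons w ws ih =>
    intro s
    rw [PySem.List.enumerate_cons, List.filterMap_cons]
    by_cases h : w.length < 3
    · simp only [ih (s + 1)]
      simp [pvBoundsN, h, List.map_map, Function.comp]
      intro a _; ring
    · simp only [ih (s + 1)]
      simp [pvBoundsN, h, List.map_map, Function.comp]
      intro a _; ring

lemma pvTake_succ_of_drop (full : List String) (p s : Nat) (w : String) (ws : List String)
    (hdrop : full.drop s = w :: ws) (hps : p ≤ s) :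
    (full.drop p).take (s - p + 1) = (full.drop p).take (s - p) ++ [w] := by
  have hget : full[s]? = some w := by
    have : (full.drop s)[0]? = some w := by rw [hdrop]; rfl
    rw [List.getElem?_drop] at this; simpa using this
  have hget' : (full.drop p)[s - p]? = some w := by
    rw [List.getElem?_drop]
    have : p + (s - p) = s := by omega
    rw [this, hget]
  rw [List.take_add_one, hget']
  rfl

-- B's fold over the boundaries shifted to position s, with pending words full[p:s]
lemma pvB_go (ws : List String) : ∀ (full : List String) (p s : Nat) (db : List String),
    full.drop s = ws → p ≤ s →
    (((pvBoundsN ws).map (fun k => ((s + k : Nat) : Int))).foldl (pvStepB full)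
        (db, ((p : Nat) : Int))).1
      = db ++ (match pvGroups ws with
        | [] => []
        | g :: gs => pvJoinRender ((full.drop p).take (s - p) ++ g) :: gs.map pvJoinRender) := by
  induction ws with
  | nil => intro full p s db _ _; simp [pvBoundsN, pvGroups]
  | cons w ws ih =>
    intro full p s db hdrop hps
    have hdrop' : full.drop (s + 1) = ws := by
      have h1 : full.drop (s + 1) = (full.drop s).drop 1 := by
        rw [List.drop_drop]
      rw [h1, hdrop]; rfl
    have hslice : PySem.List.slice full (some ((p : Nat) : Int)) (some ((s + 1 : Nat) : Int))
        = (full.drop p).take (s - p + 1) := by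
      rw [PySem.List.slice_natCast]
      congr 1; omega
    by_cases h : w.length < 3
    · -- bounds = 0 :: shifted, slice closes the pending group at w
      have hbm : (pvBoundsN (w :: ws)).map (fun k => ((s + k : Nat) : Int))
          = ((s : Nat) : Int) :: (pvBoundsN ws).map (fun k => (((s + 1) + k : Nat) : Int)) := by
        simp [pvBoundsN, h, List.map_map, Function.comp]
        intro a _; ring
      rw [hbm, List.foldl_cons]
      have hstep : pvStepB full (db, ((p : Nat) : Int)) ((s : Nat) : Int)
          = (db ++ [pvJoinRender ((full.drop p).take (s - p) ++ [w])], (((s + 1 : Nat)) : Int)) := by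
        have hc2 : ((s : Nat) : Int) + 1 = ((s + 1 : Nat) : Int) := by push_cast; ring
        simp only [pvStepB, hc2, hslice, pvTake_succ_of_drop full p s w ws hdrop hps,
          pvJoinRender]
      rw [hstep, ih full (s + 1) (s + 1) _ hdrop' (le_refl _)]
      cases hgr : pvGroups ws with
      | nil => simp [pvGroups, h, hgr]
      | cons g gs => simp [pvGroups, h, hgr]
    · -- w extends the pending prefix; start stays at p
      have hbm : (pvBoundsN (w :: ws)).map (fun k => ((s + k : Nat) : Int))
          = (pvBoundsN ws).map (fun k => (((s + 1) + k : Nat) : Int)) := by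
        simp [pvBoundsN, h, List.map_map, Function.comp]
        intro a _; ring
      rw [hbm, ih full p (s + 1) db hdrop' (by omega)]
      have htake : (full.drop p).take (s + 1 - p) = (full.drop p).take (s - p) ++ [w] := by
        have ht := pvTake_succ_of_drop full p s w ws hdrop hps
        rwa [show s - p + 1 = s + 1 - p by omega] at ht
      cases hgr : pvGroups ws with
      | nil => simp [pvGroups, h, hgr]
      | cons g gs => simp [pvGroups, h, hgr, htake]

lemma pvB_eq (ws : List String) :
    (((PySem.List.enumerate ws).filterMap
        (fun p => if PySem.Str.len p.2 < 3 then some p.1 else none)).foldl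
      (pvStepB ws) ([], 0)).1 = (pvGroups ws).map pvJoinRender := by
  rw [pvBounds_char ws 0]
  have hm : (pvBoundsN ws).map (fun k : Nat => (0 : Int) + (k : Int))
      = (pvBoundsN ws).map (fun k => ((0 + k : Nat) : Int)) := by
    refine List.map_congr_left fun k _ => ?_; push_cast; ring
  rw [hm]
  have hmain := pvB_go ws ws 0 0 [] (by simp) (le_refl 0)
  simp only [Nat.cast_zero] at hmain
  rw [hmain]
  cases hgr : pvGroups ws with
  | nil => simp
  | cons g gs => simp

theorem pv_main (ws : List String) :
    (ws.foldl pvStepA ([], "")).1 =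
    (((PySem.List.enumerate ws).filterMap
        (fun p => if PySem.Str.len p.2 < 3 then some p.1 else none)).foldl
      (pvStepB ws) ([], 0)).1 := by
  rw [pvA_eq, pvB_eq]
  apply List.map_congr_left
  intro g hg
  exact (pvJoinRender_eq_pvRender g (pvGroups_ne_nil ws g hg)).symm

-- ===== VERDICT (by name: the statement is the Claim_ definition above) =====
theorem convertB_spec : Claim_equal_convertB := by
  intro lst _
  unfold Spec_convertB convertB convertB_alt
  exact pv_main _
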